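-- pv_equiv track=rewrite | github.com/khalo13/astrology | panchang-python/love.py | calculate_personality_number
-- ===== SOURCE A (Python) =====
-- def reduce_to_digit(n):
--     """Reduce a number to a single digit or master number (11, 22, 33)."""
--     while n > 9 and n not in (11, 22, 33):
--         n = sum(int(d) for d in str(n))
--     return n
--
-- def calculate_personality_number(full_name):
--     """Sum of consonants in the full name (Pythagorean system)."""
--     def letter_to_number(letter):
--         letter = letter.upper()
--         mapping = {
--             1: "AJS", 2: "BKT", 3: "CLU", 4: "DMV", 5: "ENW",
--             6: "FOX", 7: "GPY", 8: "HQZ", 9: "IR"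
--         }
--         for num, letters in mapping.items():
--             if letter in letters:
--                 return num
--         return 0
--     vowels = "AEIOU"
--     total = sum(letter_to_number(c) for c in full_name if c.isalpha() and c.upper() not in vowels)
--     return reduce_to_digit(total)
-- ===== SOURCE B (Python) =====
-- def calculate_personality_number(full_name):
--     """Sum of consonants in the full name (Pythagorean system)."""
--     total = sum((ord(c.upper()) - ord('A')) % 9 + 1
--                 for c in full_name
--                 if c.isalpha() and c.upper() not in "AEIOU")
--
--     def digital_root(n):
--         if n <= 9 or n in (11, 22, 33):
--             return n
--         return digital_root(sum(int(d) for d in str(n)))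
--
--     return digital_root(total)
-- ===== Notes on version B (the rewrite author's own statement) =====
-- stated objective: idiomatic
-- what changed: Replaces the 9-entry mapping table and its per-letter linear scan with the closed-form Pythagorean value ((ord(c.upper()) - 65) % 9) + 1, and recasts the while-loop reduction as a recursive digital-root function.
import Mathlib
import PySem

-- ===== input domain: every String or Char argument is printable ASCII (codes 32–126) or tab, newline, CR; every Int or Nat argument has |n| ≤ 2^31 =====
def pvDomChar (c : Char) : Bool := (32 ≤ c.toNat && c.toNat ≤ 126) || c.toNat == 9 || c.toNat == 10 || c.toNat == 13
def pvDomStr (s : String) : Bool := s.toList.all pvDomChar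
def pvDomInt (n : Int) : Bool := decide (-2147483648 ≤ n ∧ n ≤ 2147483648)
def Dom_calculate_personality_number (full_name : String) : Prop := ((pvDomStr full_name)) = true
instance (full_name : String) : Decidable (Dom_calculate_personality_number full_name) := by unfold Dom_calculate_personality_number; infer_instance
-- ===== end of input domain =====

-- B replaces the per-letter mapping-table scan by the closed-form Pythagorean value and the
-- while-loop reduction by a recursive digital root (idiomatic; same return value on the domain).

-- ===== PORT A =====
def pvLTNmapping : List (Int × String) :=
  [(1, "AJS"), (2, "BKT"), (3, "CLU"), (4, "DMV"), (5, "ENW"),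
   (6, "FOX"), (7, "GPY"), (8, "HQZ"), (9, "IR")]

-- the for-loop over mapping.items() with early return; 'letter in letters' for a single
-- char is char membership in the string's characters (exact)
def pvLTNscan (letter : Char) : List (Int × String) → Int
  | [] => 0
  | (num, letters) :: rest =>
      if letters.toList.contains letter then num else pvLTNscan letter rest

def letter_to_number (letter : Char) : Int :=
  pvLTNscan (PySem.Chars.upperChar letter) pvLTNmapping

-- sum(int(d) for d in str(n)); int(d) raises only on a non-digit char, which never occurs
-- for the n (> 9) this is applied to, so the .getD 0 totality default is never used
def pyDigitSumA (n : Int) : Int :=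
  ((PySem.Int.toChars n).map (fun d => (PySem.Int.ofChars? [d]).getD 0)).sum

-- the while loop, with fuel n.toNat for totality (ample: the digit sum of n > 9 is < n)
def reduce_loopA : Nat → Int → Int
  | 0, n => n
  | fuel + 1, n =>
      if 9 < n ∧ ¬(n = 11 ∨ n = 22 ∨ n = 33) then reduce_loopA fuel (pyDigitSumA n) else n

def reduce_to_digit (n : Int) : Int := reduce_loopA n.toNat n

def calculate_personality_number (full_name : String) : Int :=
  let total := full_name.toList.foldl
    (fun acc c =>
      if PySem.Chars.isalpha c ∧ ¬ ("AEIOU".toList.contains (PySem.Chars.upperChar c)) then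
        acc + letter_to_number c
      else acc) 0
  reduce_to_digit total

-- ===== PORT B =====
def pyDigitSumB (n : Int) : Int :=
  ((PySem.Int.toChars n).map (fun d => (PySem.Int.ofChars? [d]).getD 0)).sum

-- the recursive digital root of Source B, with fuel n.toNat for totality
def digital_root : Nat → Int → Int
  | 0, n => n
  | fuel + 1, n =>
      if n ≤ 9 ∨ n = 11 ∨ n = 22 ∨ n = 33 then n else digital_root fuel (pyDigitSumB n)

def calculate_personality_number_alt (full_name : String) : Int :=
  let total := ((full_name.toList.filter
      (fun c => PySem.Chars.isalpha c &&
                !("AEIOU".toList.contains (PySem.Chars.upperChar c)))).map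
      (fun c => PySem.Int.mod (((PySem.Chars.upperChar c).toNat : Int) - 65) 9 + 1)).sum
  digital_root total.toNat total

-- ===== PRECONDITION & SPEC =====
def Spec_calculate_personality_number (full_name : String) (out : Int) : Prop := out = calculate_personality_number_alt full_name
instance (full_name : String) (out : Int) : Decidable (Spec_calculate_personality_number full_name out) := by unfold Spec_calculate_personality_number; infer_instance

-- ===== CLAIM (what is proved, stated in full; the proofs are below) =====
def Claim_equal_calculate_personality_number : Prop := ∀ (full_name : String), Dom_calculate_personality_number full_name → Spec_calculate_personality_number full_name (calculate_personality_number full_name)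

-- ===== LEMMAS AND PROOFS =====

def pvConsP (c : Char) : Bool :=
  PySem.Chars.isalpha c && !("AEIOU".toList.contains (PySem.Chars.upperChar c))

def pvVal (c : Char) : Int :=
  PySem.Int.mod (((PySem.Chars.upperChar c).toNat : Int) - 65) 9 + 1

theorem loops_eq (fuel : Nat) (n : Int) : reduce_loopA fuel n = digital_root fuel n := by
  induction fuel generalizing n with
  | zero => rfl
  | succ k ih =>
      simp only [reduce_loopA, digital_root, pyDigitSumA, pyDigitSumB]
      split_ifs with h1 h2 <;> first | omega | rfl | exact ih _

theorem char_val (i : Fin 128) (h : pvConsP (Char.ofNat i) = true) :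
    letter_to_number (Char.ofNat i) = pvVal (Char.ofNat i) := by
  revert h; revert i; decide

theorem ofNat_toNat_eq (c : Char) : Char.ofNat c.toNat = c :=
  Char.ofNat_toNat c

theorem fold_eq (l : List Char) (acc : Int) (hd : ∀ c ∈ l, c.toNat < 128) :
    l.foldl
      (fun acc c =>
        if PySem.Chars.isalpha c ∧ ¬ ("AEIOU".toList.contains (PySem.Chars.upperChar c)) then
          acc + letter_to_number c
        else acc) acc
    = acc + ((l.filter pvConsP).map pvVal).sum := by
  induction l generalizing acc with
  | nil => simp
  | cons c rest ih =>
      have hc : c.toNat < 128 := hd c (List.mem_cons_self)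
      have hrest : ∀ x ∈ rest, x.toNat < 128 := fun x hx => hd x (List.mem_cons_of_mem _ hx)
      simp only [List.foldl_cons, List.filter_cons]
      by_cases hp : pvConsP c = true
      · have hcv : letter_to_number c = pvVal c := by
          have := char_val ⟨c.toNat, hc⟩ (by simpa [ofNat_toNat_eq] using hp)
          simpa [ofNat_toNat_eq] using this
        have hcond : PySem.Chars.isalpha c ∧ ¬ ("AEIOU".toList.contains (PySem.Chars.upperChar c)) := by
          simpa [pvConsP] using hp
        rw [if_pos hcond, hp, ih _ hrest]
        simp [hcv]; ring
      · have hcond : ¬ (PySem.Chars.isalpha c ∧ ¬ ("AEIOU".toList.contains (PySem.Chars.upperChar c))) := by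
          simpa [pvConsP] using hp
        rw [if_neg hcond]
        simp only [hp]
        simp only [Bool.false_eq_true, if_false]
        exact ih _ hrest

-- ===== VERDICT (by name: the statement is the Claim_ definition above) =====
theorem calculate_personality_number_spec : Claim_equal_calculate_personality_number := by
  intro s hdom
  unfold Spec_calculate_personality_number calculate_personality_number calculate_personality_number_alt
  have hd : ∀ c ∈ s.toList, c.toNat < 128 := by
    intro c hc
    have := List.all_eq_true.mp hdom c hc
    simp only [pvDomChar, Bool.or_eq_true, Bool.and_eq_true, decide_eq_true_eq,
      beq_iff_eq] at this
    omega
  rw [fold_eq s.toList 0 hd]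
  simp only [zero_add, reduce_to_digit]
  exact loops_eq _ _
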